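-- pv_equiv track=rewrite | github.com/OckermanSethGVSU/ISYE_524_W26 | visualize_solution.py | family_components
-- ===== SOURCE A (Python) =====
-- from collections import Counter, defaultdict
--
-- def bom_children_by_parent(bom_rows: list[dict[str, str]]) -> dict[str, list[str]]:
--     children_by_parent: dict[str, list[str]] = defaultdict(list)
--     for row in bom_rows:
--         children_by_parent[row["parent_component_id"]].append(row["child_component_id"])
--     return dict(children_by_parent)
--
-- def family_components(root_component_id: str, bom_rows: list[dict[str, str]]) -> list[str]:
--     children_by_parent = bom_children_by_parent(bom_rows)
--     ordered_components: list[str] = []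
--     visited: set[str] = set()
--     stack = [root_component_id]
--
--     while stack:
--         component_id = stack.pop()
--         if component_id in visited:
--             continue
--         visited.add(component_id)
--         ordered_components.append(component_id)
--         stack.extend(reversed(children_by_parent.get(component_id, [])))
--
--     return ordered_components
-- ===== SOURCE B (Python) =====
-- def family_components(root_component_id: str, bom_rows: list[dict[str, str]]) -> list[str]:
--     children_by_parent: dict[str, list[str]] = {}
--     for row in bom_rows:
--         children_by_parent.setdefault(row["parent_component_id"], []).append(row["child_component_id"])
--
--     visited: set[str] = set()
--     ordered_components: list[str] = []
--
--     def visit(node: str) -> None: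
--         if node in visited:
--             return
--         visited.add(node)
--         ordered_components.append(node)
--         for child in children_by_parent.get(node, []):
--             visit(child)
--
--     visit(root_component_id)
--     return ordered_components
-- ===== Notes on version B (the rewrite author's own statement) =====
-- stated objective: alternative
-- what changed: A runs an iterative DFS over an explicit node stack (visited check at pop, children pushed in reversed order); B replaces the stack with a recursive visit helper that marks/emits a node on entry and recurses into its children in forward order.
import Mathlib
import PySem

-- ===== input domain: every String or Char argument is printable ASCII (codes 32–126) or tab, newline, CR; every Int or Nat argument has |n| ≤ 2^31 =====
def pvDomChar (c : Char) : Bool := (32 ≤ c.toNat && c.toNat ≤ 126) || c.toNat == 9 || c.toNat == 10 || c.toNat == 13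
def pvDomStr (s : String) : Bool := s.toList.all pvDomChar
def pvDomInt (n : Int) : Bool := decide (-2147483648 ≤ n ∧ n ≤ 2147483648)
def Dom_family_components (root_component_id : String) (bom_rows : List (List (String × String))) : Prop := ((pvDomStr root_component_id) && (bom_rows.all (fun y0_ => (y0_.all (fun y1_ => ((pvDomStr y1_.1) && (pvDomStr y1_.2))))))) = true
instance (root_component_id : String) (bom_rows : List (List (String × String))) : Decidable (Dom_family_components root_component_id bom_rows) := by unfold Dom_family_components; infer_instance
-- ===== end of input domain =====

-- B replaces A's explicit-node-stack DFS (visited check at pop, children pushed reversed) by a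
-- recursive visit helper that marks/emits a node on entry and recurses into its children in
-- forward order; alternative decomposition, same cost.

-- ===== PORT A =====
-- row["k"] on a row dict (assoc list, first match); "" never occurs under Pre_ (key present)
def pvRowGet (row : List (String × String)) (k : String) : String := (List.lookup k row).getD ""

-- bom_children_by_parent: defaultdict(list) append loop, then dict(...) copy (same items, same order)
def pvCBP (bom_rows : List (List (String × String))) : PySem.Dict String (List String) :=
  bom_rows.foldl
    (fun d row => d.modify (pvRowGet row "parent_component_id") []
      (fun cs => cs ++ [pvRowGet row "child_component_id"]))
    PySem.Dict.empty

-- number of cbp keys not yet visited (termination measure component)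
def pvUnvisited (cbp : PySem.Dict String (List String)) (v : PySem.Set String) : Nat :=
  (cbp.keys.filter (fun k => !(PySem.Set.contains v k))).length

-- total number of children stored in cbp (bounds one children list)
def pvSumLens (cbp : PySem.Dict String (List String)) : Nat :=
  (cbp.values.map List.length).sum

-- a filter over a weaker predicate is strictly shorter once one kept element is dropped
theorem pvFilterLt (l : List String) (p q : String → Bool) (h : ∀ x, q x = true → p x = true)
    (c : String) (hc : c ∈ l) (hp : p c = true) (hq : q c = false) :
    (l.filter q).length < (l.filter p).length := by
  induction l with
  | nil => simp at hc
  | cons a t ih =>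
    have hle : (t.filter q).length ≤ (t.filter p).length :=
      List.Sublist.length_le (List.monotone_filter_right t h)
    rcases List.mem_cons.mp hc with h1 | hc
    · subst h1; simp [hp, hq]; omega
    · by_cases hqa : q a = true
      · simp [hqa, h a hqa]; exact ih hc
      · by_cases hpa : p a = true
        · simp [hqa, hpa]; have := ih hc; omega
        · simp [hqa, hpa]; exact ih hc

theorem pvUnvisited_add_le (cbp : PySem.Dict String (List String)) (v : PySem.Set String)
    (c : String) : pvUnvisited cbp (PySem.Set.add v c) ≤ pvUnvisited cbp v := by
  unfold pvUnvisited
  refine List.Sublist.length_le (List.monotone_filter_right _ ?_)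
  intro x hx
  simp only [Bool.not_eq_eq_eq_not, Bool.not_true] at hx ⊢
  simp [pysem, PySem.Set.mem_add] at hx ⊢
  tauto

theorem pvUnvisited_add_lt (cbp : PySem.Dict String (List String)) (v : PySem.Set String)
    (c : String) (hk : cbp.contains c = true) (hv : PySem.Set.contains v c = false) :
    pvUnvisited cbp (PySem.Set.add v c) < pvUnvisited cbp v := by
  unfold pvUnvisited
  refine pvFilterLt _ _ _ ?_ c ?_ ?_ ?_
  · intro x hx
    simp only [Bool.not_eq_eq_eq_not, Bool.not_true] at hx ⊢
    simp [pysem, PySem.Set.mem_add] at hx ⊢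
    tauto
  · exact (PySem.Dict.contains_iff_mem_keys cbp c).mp hk
  · simpa using hv
  · simp [pysem, PySem.Set.mem_add]

theorem pvGetD_nonkey (cbp : PySem.Dict String (List String)) (c : String)
    (hk : cbp.contains c = false) : cbp.getD c [] = [] :=
  PySem.Dict.getD_of_not_contains cbp [] hk

theorem pvGetD_len_le (cbp : PySem.Dict String (List String)) (c : String)
    (hk : cbp.contains c = true) : (cbp.getD c []).length ≤ pvSumLens cbp := by
  have hsome : (cbp.get? c).isSome := by
    rw [← PySem.Dict.contains_eq_isSome_get? cbp c]; exact hk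
  obtain ⟨l, hl⟩ := Option.isSome_iff_exists.mp hsome
  have hmem : (c, l) ∈ cbp.items := PySem.Dict.mem_items_of_get?_eq_some cbp hl
  have hval : l ∈ cbp.values := by
    simp only [PySem.Dict.values]
    exact List.mem_map_of_mem hmem
  rw [PySem.Dict.getD_of_get?_eq_some cbp [] hl]
  exact List.single_le_sum (fun x _ => Nat.zero_le x) _ (List.mem_map_of_mem hval)

-- named termination lemmas: the decreasing_by proofs of both ports cite these by name
theorem pvDecA1 (cbp : PySem.Dict String (List String)) (v : PySem.Set String)
    (c : String) (rest : List String) :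
    (pvSumLens cbp + 1) * pvUnvisited cbp v + rest.length
      < (pvSumLens cbp + 1) * pvUnvisited cbp v + (c :: rest).length := by
  simp only [List.length_cons]; omega

theorem pvDecA2 (cbp : PySem.Dict String (List String)) (v : PySem.Set String)
    (c : String) (rest : List String) (hv : PySem.Set.contains v c = false) :
    (pvSumLens cbp + 1) * pvUnvisited cbp (PySem.Set.add v c) + (cbp.getD c [] ++ rest).length
      < (pvSumLens cbp + 1) * pvUnvisited cbp v + (c :: rest).length := by
  by_cases hk : cbp.contains c = true
  · have h1 := pvUnvisited_add_lt cbp v c hk hv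
    have h2 := pvGetD_len_le cbp c hk
    have hm : (pvSumLens cbp + 1) * pvUnvisited cbp (v.add c) + (pvSumLens cbp + 1)
        ≤ (pvSumLens cbp + 1) * pvUnvisited cbp v := by
      have := Nat.mul_le_mul (Nat.le_refl (pvSumLens cbp + 1)) (Nat.succ_le_of_lt h1)
      rwa [Nat.mul_succ] at this
    simp only [List.length_append, List.length_cons]
    omega
  · have h0 : cbp.getD c [] = [] := pvGetD_nonkey cbp c (by simpa using hk)
    have hm : (pvSumLens cbp + 1) * pvUnvisited cbp (v.add c)
        ≤ (pvSumLens cbp + 1) * pvUnvisited cbp v :=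
      Nat.mul_le_mul (Nat.le_refl _) (pvUnvisited_add_le cbp v c)
    simp only [h0, List.nil_append, List.length_cons]
    omega

theorem pvDecB1 (cbp : PySem.Dict String (List String)) (v : PySem.Set String)
    (c : String) (cs : List String) :
    (2 * pvSumLens cbp + 2) * pvUnvisited cbp v + 2 * cs.length
      < (2 * pvSumLens cbp + 2) * pvUnvisited cbp v + 2 * (c :: cs).length := by
  simp only [List.length_cons]; omega

theorem pvDecB2 (cbp : PySem.Dict String (List String)) (v : PySem.Set String)
    (c : String) (cs : List String) (hv : PySem.Set.contains v c = false) :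
    (2 * pvSumLens cbp + 2) * pvUnvisited cbp (PySem.Set.add v c) + 2 * (cbp.getD c []).length
      < (2 * pvSumLens cbp + 2) * pvUnvisited cbp v + 2 * (c :: cs).length := by
  by_cases hk : cbp.contains c = true
  · have h1 := pvUnvisited_add_lt cbp v c hk hv
    have h2 := pvGetD_len_le cbp c hk
    have hm : (2 * pvSumLens cbp + 2) * pvUnvisited cbp (v.add c) + (2 * pvSumLens cbp + 2)
        ≤ (2 * pvSumLens cbp + 2) * pvUnvisited cbp v := by
      have := Nat.mul_le_mul (Nat.le_refl (2 * pvSumLens cbp + 2)) (Nat.succ_le_of_lt h1)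
      rwa [Nat.mul_succ] at this
    simp only [List.length_cons]
    omega
  · have h0 : cbp.getD c [] = [] := pvGetD_nonkey cbp c (by simpa using hk)
    have hm : (2 * pvSumLens cbp + 2) * pvUnvisited cbp (v.add c)
        ≤ (2 * pvSumLens cbp + 2) * pvUnvisited cbp v :=
      Nat.mul_le_mul (Nat.le_refl _) (pvUnvisited_add_le cbp v c)
    simp only [h0, List.length_nil, List.length_cons]
    omega

theorem pvDecB3 (cbp : PySem.Dict String (List String)) (v t : PySem.Set String)
    (c : String) (cs : List String) (h1 : pvUnvisited cbp t ≤ pvUnvisited cbp (PySem.Set.add v c)) :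
    (2 * pvSumLens cbp + 2) * pvUnvisited cbp t + 2 * cs.length
      < (2 * pvSumLens cbp + 2) * pvUnvisited cbp v + 2 * (c :: cs).length := by
  have hle : pvUnvisited cbp t ≤ pvUnvisited cbp v :=
    Nat.le_trans h1 (pvUnvisited_add_le cbp v c)
  have hm : (2 * pvSumLens cbp + 2) * pvUnvisited cbp t
      ≤ (2 * pvSumLens cbp + 2) * pvUnvisited cbp v :=
    Nat.mul_le_mul (Nat.le_refl _) hle
  simp only [List.length_cons]
  omega

-- A's while loop; the Python stack pops from the END and extends with reversed children, which is
-- exactly a head-is-top list whose head is popped and whose children are prepended in order.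
-- Returns (visited, ordered_components); A uses only the second component.
def pvLoopA (cbp : PySem.Dict String (List String)) (visited : PySem.Set String)
    (acc : List String) (stack : List String) : PySem.Set String × List String :=
  match stack with
  | [] => (visited, acc)
  | c :: rest =>
    if PySem.Set.contains visited c then
      pvLoopA cbp visited acc rest
    else
      pvLoopA cbp (PySem.Set.add visited c) (acc ++ [c]) (cbp.getD c [] ++ rest)
termination_by (pvSumLens cbp + 1) * pvUnvisited cbp visited + stack.length
decreasing_by
  · exact pvDecA1 cbp visited c rest
  · rename_i hv
    exact pvDecA2 cbp visited c rest (by simpa using hv)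

def family_components (root_component_id : String) (bom_rows : List (List (String × String))) : List String :=
  (pvLoopA (pvCBP bom_rows) PySem.Set.empty [] [root_component_id]).2

-- ===== PORT B =====
-- B's recursive visit helper, transcribed over the list of nodes it is invoked on in sequence
-- (the body of 'for child in …: visit(child)'; the top-level call is the singleton list).
-- The state is (visited, ordered_components); the subtype records that a call never increases
-- the number of unvisited cbp keys, which the nested recursion's termination needs.
def pvVisitRec (cbp : PySem.Dict String (List String)) (l : List String)
    (s : PySem.Set String × List String) :
    {t : PySem.Set String × List String // pvUnvisited cbp t.1 ≤ pvUnvisited cbp s.1} :=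
  match l with
  | [] => ⟨s, Nat.le_refl _⟩
  | c :: cs =>
    if PySem.Set.contains s.1 c then
      -- visit(c) returns immediately; continue with the remaining calls
      pvVisitRec cbp cs s
    else
      -- mark and emit c, recurse into its children, then continue with the remaining calls
      match pvVisitRec cbp (cbp.getD c []) (PySem.Set.add s.1 c, s.2 ++ [c]) with
      | ⟨t1, h1⟩ =>
        match pvVisitRec cbp cs t1 with
        | ⟨t2, h2⟩ =>
          ⟨t2, Nat.le_trans h2 (Nat.le_trans h1 (pvUnvisited_add_le cbp s.1 c))⟩
termination_by (2 * pvSumLens cbp + 2) * pvUnvisited cbp s.1 + 2 * l.length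
decreasing_by
  · exact pvDecB1 cbp s.1 c cs
  · rename_i hv
    exact pvDecB2 cbp s.1 c cs (by simpa using hv)
  · exact pvDecB3 cbp s.1 t1.1 c cs (by simpa using h1)

def family_components_alt (root_component_id : String) (bom_rows : List (List (String × String))) : List String :=
  let cbp := pvCBP bom_rows
  (pvVisitRec cbp [root_component_id] (PySem.Set.empty, [])).1.2

-- ===== PRECONDITION & SPEC =====
-- Pre_ excludes exactly the rows missing the key "parent_component_id" or "child_component_id",
-- on which Python A raises KeyError.
def Pre_family_components (root_component_id : String) (bom_rows : List (List (String × String))) : Prop :=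
  ∀ row ∈ bom_rows, (List.lookup "parent_component_id" row).isSome = true ∧
    (List.lookup "child_component_id" row).isSome = true
instance (root_component_id : String) (bom_rows : List (List (String × String))) : Decidable (Pre_family_components root_component_id bom_rows) := by unfold Pre_family_components; infer_instance

def pvWitness_family_components : String × (List (List (String × String))) :=
  ("a", [[("parent_component_id", "a"), ("child_component_id", "b")]])

def Spec_family_components (root_component_id : String) (bom_rows : List (List (String × String))) (out : List String) : Prop := out = family_components_alt root_component_id bom_rows
instance (root_component_id : String) (bom_rows : List (List (String × String))) (out : List String) : Decidable (Spec_family_components root_component_id bom_rows out) := by unfold Spec_family_components; infer_instance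

-- ===== CLAIM (what is proved, stated in full; the proofs are below) =====
def Claim_equal_family_components : Prop := ∀ (root_component_id : String) (bom_rows : List (List (String × String))), Dom_family_components root_component_id bom_rows → Pre_family_components root_component_id bom_rows → Spec_family_components root_component_id bom_rows (family_components root_component_id bom_rows)

-- ===== LEMMAS AND PROOFS =====

-- B's recursive visits, run on the node list l, advance A's node-stack loop past l.
theorem pvVisitRec_loopA (cbp : PySem.Dict String (List String)) (l : List String)
    (s : PySem.Set String × List String) :
    ∀ rest : List String,
      pvLoopA cbp s.1 s.2 (l ++ rest)
        = pvLoopA cbp (pvVisitRec cbp l s).1.1 (pvVisitRec cbp l s).1.2 rest := by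
  fun_induction pvVisitRec cbp l s with
  | case1 s => intro rest; simp
  | case2 s c cs hv ih =>
    intro rest
    rw [pvLoopA.eq_def]
    simp only [List.cons_append, hv, if_pos]
    exact ih rest
  | case3 s c cs hv t1 h1 heq1 t2 h2 heq2 ihChildren ihRest =>
    intro rest
    rw [pvLoopA.eq_def]
    simp only [List.cons_append, hv, if_neg, Bool.false_eq_true, not_false_iff]
    have hA := ihChildren (cs ++ rest)
    rw [heq1] at hA
    have hB := ihRest rest
    rw [heq2] at hB
    simp only at hA hB ⊢
    rw [hA, hB]

-- ===== VERDICT (by name: the statement is the Claim_ definition above) =====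
theorem family_components_spec : Claim_equal_family_components := by
  intro root bom_rows _ _
  unfold Spec_family_components family_components family_components_alt
  have h := pvVisitRec_loopA (pvCBP bom_rows) [root] (PySem.Set.empty, []) []
  simp only [List.append_nil] at h
  rw [h]
  rw [pvLoopA.eq_def]
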